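-- pv_equiv track=rewrite | github.com/Anna-Pinewood/arxiv_scraper_bot | src/scrape.py | process_newlines_abstract
-- ===== SOURCE A (Python) =====
-- def process_newlines_abstract(input_string):
--     output_string = ""
--     for i in range(len(input_string)):
--         if input_string[i] == "\n":
--             if i > 0 and input_string[i-1] == ".":
--                 output_string += "\n"
--         else:
--             output_string += input_string[i]
--     output_string = output_string.replace("\n", "\n\n")
--     return output_string
-- ===== SOURCE B (Python) =====
-- def process_newlines_abstract(input_string):
--     # One comprehension pass over (previous char, char) pairs: a newline survives
--     # (doubled) only when the original previous character is a period.
--     return "".join(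
--         ("\n\n" if prev == "." else "") if ch == "\n" else ch
--         for prev, ch in zip("\x00" + input_string, input_string))
-- ===== Notes on version B (the rewrite author's own statement) =====
-- stated objective: simpler
-- what changed: Replaces the index loop with per-character string appends plus a second replace pass by a single generator comprehension over zipped (previous char, char) pairs that emits the doubled newline directly, joined once.
import Mathlib
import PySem

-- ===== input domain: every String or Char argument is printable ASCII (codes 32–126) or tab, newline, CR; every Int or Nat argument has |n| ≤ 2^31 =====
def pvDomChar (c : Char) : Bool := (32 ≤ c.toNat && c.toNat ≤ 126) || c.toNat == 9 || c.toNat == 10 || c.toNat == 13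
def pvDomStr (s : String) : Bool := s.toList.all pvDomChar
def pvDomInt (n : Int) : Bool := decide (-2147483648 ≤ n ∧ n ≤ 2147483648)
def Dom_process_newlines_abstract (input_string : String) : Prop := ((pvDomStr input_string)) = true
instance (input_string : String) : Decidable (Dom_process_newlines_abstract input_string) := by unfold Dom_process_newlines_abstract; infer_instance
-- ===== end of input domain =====

-- B replaces A's index loop (character-by-character appends followed by a replace pass)
-- with a single pass over (previous char, char) pairs that emits doubled newlines directly: simpler.

-- ===== PORT A =====
-- Inside the loop every index i and (when 0 < i) i-1 is in range, so pyGetD is exact there.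
def process_newlines_abstract (input_string : String) : String :=
  let cs := input_string.toList
  let output_string : String :=
    (PySem.List.pyRange 0 (PySem.Str.len input_string) 1).foldl
      (fun output_string i =>
        if PySem.List.pyGetD cs i '\x00' = '\n' then
          if 0 < i ∧ PySem.List.pyGetD cs (i - 1) '\x00' = '.' then
            output_string ++ "\n"
          else
            output_string
        else
          output_string ++ String.ofList [PySem.List.pyGetD cs i '\x00']) ""
  PySem.Str.replace output_string "\n" "\n\n"

-- ===== PORT B =====
def process_newlines_abstract_alt (input_string : String) : String :=
  String.ofList
    ((List.zip ('\x00' :: input_string.toList) input_string.toList).flatMap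
      (fun pc =>
        if pc.2 = '\n' then (if pc.1 = '.' then ['\n', '\n'] else []) else [pc.2]))

-- ===== PRECONDITION & SPEC =====
def Spec_process_newlines_abstract (input_string : String) (out : String) : Prop := out = process_newlines_abstract_alt input_string
instance (input_string : String) (out : String) : Decidable (Spec_process_newlines_abstract input_string out) := by unfold Spec_process_newlines_abstract; infer_instance

-- ===== CLAIM (what is proved, stated in full; the proofs are below) =====
def Claim_equal_process_newlines_abstract : Prop := ∀ (input_string : String), Dom_process_newlines_abstract input_string → Spec_process_newlines_abstract input_string (process_newlines_abstract input_string)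

-- ===== LEMMAS AND PROOFS =====

/-- The characters A's loop keeps, by recursion on the string with the previous char carried. -/
def keepNL : Option Char → List Char → List Char
  | _, [] => []
  | prev, c :: t =>
      (if c = '\n' then (if prev = some '.' then ['\n'] else []) else [c]) ++ keepNL (some c) t

/-- Single-char `replace` as a `flatMap` (characterises `Chars.replace.go` for old = ['\n']). -/
theorem replace_go_newline (new : List Char) :
    ∀ (fuel : Nat) (l acc : List Char), l.length ≤ fuel →
      PySem.Chars.replace.go ['\n'] new fuel l acc =
        acc.reverse ++ l.flatMap (fun c => if c = '\n' then new else [c]) := by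
  intro fuel
  induction fuel with
  | zero =>
      intro l acc h
      have : l = [] := List.eq_nil_of_length_eq_zero (Nat.le_zero.mp h)
      subst this; simp [PySem.Chars.replace.go]
  | succ n ih =>
      intro l acc h
      cases l with
      | nil => simp [PySem.Chars.replace.go]
      | cons c t =>
          simp only [PySem.Chars.replace.go]
          by_cases hc : c = '\n'
          · subst hc
            rw [if_pos (by simp [List.isPrefixOf])]
            simp only [List.length_cons, List.length_nil, List.drop_succ_cons, List.drop_zero]
            rw [ih t _ (by simpa using Nat.succ_le_succ_iff.mp h)]
            simp
          · have hpre : (['\n'].isPrefixOf (c :: t)) = false := by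
              simp [List.isPrefixOf]; exact fun h' => hc h'.symm
            simp only [hpre, Bool.false_eq_true, if_false]
            rw [ih t _ (by simpa using Nat.succ_le_succ_iff.mp h)]
            simp [hc]

theorem replace_newline (l new : List Char) :
    PySem.Chars.replace l ['\n'] new = l.flatMap (fun c => if c = '\n' then new else [c]) := by
  rw [PySem.Chars.replace, if_neg (by simp)]
  exact replace_go_newline new l.length l [] (le_refl _)

/-- A's loop, characterised: starting at index k with the matching previous char. -/
theorem loopA_aux (cs : List Char) :
    ∀ (n k : Nat) (acc : String), cs.length - k = n → k ≤ cs.length →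
      ((PySem.List.pyRange (k : Int) (cs.length : Int) 1).foldl
        (fun output_string i =>
          if PySem.List.pyGetD cs i '\x00' = '\n' then
            if 0 < i ∧ PySem.List.pyGetD cs (i - 1) '\x00' = '.' then
              output_string ++ "\n"
            else
              output_string
          else
            output_string ++ String.ofList [PySem.List.pyGetD cs i '\x00']) acc).toList =
      acc.toList ++ keepNL (if k = 0 then none else cs[k-1]?) (cs.drop k) := by
  intro n
  induction n with
  | zero =>
      intro k acc hn hk
      have hk' : k = cs.length := by omega
      subst hk'
      rw [PySem.List.pyRange_one_eq_nil (le_refl _)]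
      simp [keepNL]
  | succ n ih =>
      intro k acc hn hk
      have hklt : k < cs.length := by omega
      rw [PySem.List.pyRange_one_cons (by exact_mod_cast hklt)]
      have hdrop : cs.drop k = cs[k] :: cs.drop (k + 1) := List.drop_eq_getElem_cons hklt
      simp only [List.foldl_cons]
      have hget : PySem.List.pyGetD cs (k : Int) '\x00' = cs[k] := by
        simp [PySem.List.pyGetD_natCast, List.getD_eq_getElem?_getD, hklt]
      have hstep : ((k : Int) + 1) = ((k + 1 : Nat) : Int) := by push_cast; ring
      rw [hstep, ih (k + 1) _ (by omega) (by omega)]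
      rw [hdrop]
      by_cases hc : cs[k] = '\n'
      · by_cases hcond : 0 < (k : Int) ∧ PySem.List.pyGetD cs ((k : Int) - 1) '\x00' = '.'
        · have hk0 : k ≠ 0 := by rcases hcond with ⟨h1, _⟩; omega
          have hprev : (if k = 0 then none else cs[k-1]?) = some '.' := by
            rcases hcond with ⟨h1, h2⟩
            have hk1 : ((k : Int) - 1) = ((k - 1 : Nat) : Int) := by omega
            rw [hk1, PySem.List.pyGetD_natCast] at h2
            have hlt : k - 1 < cs.length := by omega
            rw [List.getD_eq_getElem?_getD, List.getElem?_eq_getElem hlt] at h2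
            simp only [if_neg hk0, List.getElem?_eq_getElem hlt]
            simpa using h2
          simp only [hget, hc, if_pos hcond, keepNL, hprev]
          have hkk : k + 1 - 1 = k := by omega
          simp [hkk, List.getElem?_eq_getElem hklt, hc]
        · have hprev : ¬ ((if k = 0 then none else cs[k-1]?) = some '.') := by
            intro hcontra
            apply hcond
            by_cases hk0 : k = 0
            · simp [hk0] at hcontra
            · rw [if_neg hk0] at hcontra
              refine ⟨by omega, ?_⟩
              have hk1 : ((k : Int) - 1) = ((k - 1 : Nat) : Int) := by omega
              rw [hk1, PySem.List.pyGetD_natCast]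
              have hlt : k - 1 < cs.length := by omega
              rw [List.getElem?_eq_getElem hlt] at hcontra
              rw [List.getD_eq_getElem?_getD, List.getElem?_eq_getElem hlt]
              simpa using hcontra
          simp only [hget, hc, if_neg hcond, keepNL, if_neg hprev]
          have hkk : k + 1 - 1 = k := by omega
          simp [hkk, List.getElem?_eq_getElem hklt, hc]
      · simp only [hget, keepNL, if_neg hc]
        have hkk : k + 1 - 1 = k := by omega
        simp [hkk, List.getElem?_eq_getElem hklt]

/-- Doubling the kept newlines equals B's one-pass flatMap over (prev, char) pairs. -/
theorem keep_double_eq_zip (l : List Char) :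
    ∀ (prev : Option Char) (p0 : Char), (prev = some '.' ↔ p0 = '.') →
      (keepNL prev l).flatMap (fun c => if c = '\n' then ['\n', '\n'] else [c]) =
      (List.zip (p0 :: l) l).flatMap
        (fun pc => if pc.2 = '\n' then (if pc.1 = '.' then ['\n', '\n'] else []) else [pc.2]) := by
  induction l with
  | nil => intro prev p0 _; simp [keepNL]
  | cons c t ih =>
      intro prev p0 hpp
      simp only [keepNL, List.zip_cons_cons, List.flatMap_cons, List.flatMap_append]
      rw [ih (some c) c (by simp)]
      by_cases hc : c = '\n'
      · subst hc
        by_cases hp : prev = some '.'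
        · rw [if_pos rfl, if_pos hp, if_pos rfl, if_pos (hpp.mp hp)]
          simp
        · rw [if_pos rfl, if_neg hp, if_pos rfl, if_neg (fun h => hp (hpp.mpr h))]
          simp
      · simp [hc]

-- ===== VERDICT (by name: the statement is the Claim_ definition above) =====
theorem process_newlines_abstract_spec : Claim_equal_process_newlines_abstract := by
  intro s _
  unfold Spec_process_newlines_abstract process_newlines_abstract process_newlines_abstract_alt
  have hlen : PySem.Str.len s = (s.toList.length : Int) := by simp [PySem.Str.len_eq]
  apply String.ext
  rw [PySem.Str.toList_replace, hlen]
  have hloop := loopA_aux s.toList (s.toList.length) 0 "" (by omega) (Nat.zero_le _)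
  simp only [Nat.cast_zero] at hloop
  rw [hloop]
  simp only [List.drop_zero, if_true, String.toList_empty, List.nil_append]
  rw [show ("\n".toList) = ['\n'] from rfl, show ("\n\n".toList) = ['\n', '\n'] from rfl]
  rw [replace_newline]
  rw [keep_double_eq_zip s.toList none '\x00' (by constructor <;> intro h <;> simp_all)]
  simp
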